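-- pv_equiv track=rewrite | github.com/SCoyle100/Python_Billing_Assistant | image_generation/create_pdf_image.py | normalize_service_period
-- ===== SOURCE A (Python) =====
-- def clean(s: str) -> str:
--     """Clean text by removing control characters (including BEL \x07) and extra whitespace"""
--     if not s:
--         return ''
--     # Remove BEL character and other control characters
--     s = s.replace('\x07', '').strip().lower()
--     return s
--
-- def normalize_service_period(svc):
--     """Normalize service periods for consistent comparison"""
--     if not svc:
--         return ""
--
--     # Clean and lowercase the service period
--     svc = clean(svc).lower()
--
--     # Standardize common month formats
--     month_mappings = {
--         "january": "jan", "february": "feb", "march": "mar",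
--         "april": "apr", "may": "may", "june": "jun",
--         "july": "jul", "august": "aug", "september": "sep",
--         "october": "oct", "november": "nov", "december": "dec"
--     }
--
--     for full_month, abbr in month_mappings.items():
--         svc = svc.replace(full_month, abbr)
--
--     # Remove extra spaces
--     svc = " ".join(svc.split())
--
--     return svc
-- ===== SOURCE B (Python) =====
-- def clean(s: str) -> str:
--     """Clean text by removing control characters (including BEL \x07) and extra whitespace"""
--     if not s:
--         return ''
--     # Remove BEL character and other control characters
--     s = s.replace('\x07', '').strip().lower()
--     return s
--
-- MONTHS = [
--     ("january", "jan"), ("february", "feb"), ("march", "mar"),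
--     ("april", "apr"), ("may", "may"), ("june", "jun"),
--     ("july", "jul"), ("august", "aug"), ("september", "sep"),
--     ("october", "oct"), ("november", "nov"), ("december", "dec"),
-- ]
--
-- def normalize_service_period(svc):
--     """Normalize service periods for consistent comparison"""
--     if not svc:
--         return ""
--     s = clean(svc)
--     # Single left-to-right pass: at each position, emit the abbreviation of the
--     # month starting there (month names never overlap), else copy the character.
--     out = []
--     i = 0
--     n = len(s)
--     while i < n:
--         for full, abbr in MONTHS:
--             if s.startswith(full, i):
--                 out.append(abbr)
--                 i += len(full)
--                 break
--         else:
--             out.append(s[i])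
--             i += 1
--     return " ".join("".join(out).split())
-- ===== Notes on version B (the rewrite author's own statement) =====
-- stated objective: alternative
-- what changed: Replaces the sequence of 12 whole-string str.replace passes by a single left-to-right scan that emits the abbreviation of whichever month name starts at the current position (month names never overlap), keeping the identical clean() and whitespace-join steps.
-- intended difference: On inputs whose lowercased text contains 'januaryovember' or 'juneovember', A's sequential replacement manufactures a new 'november' occurrence out of the emitted 'jan'/'jun' plus the following text and then abbreviates it too (e.g. 'januaryovember' -> 'janov'), while B abbreviates only month names present in the input ('janovember'), which is the intended normalization. — e.g. on normalize_service_period("januaryovember"): A returns "janov", B returns "janovember"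
import Mathlib
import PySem

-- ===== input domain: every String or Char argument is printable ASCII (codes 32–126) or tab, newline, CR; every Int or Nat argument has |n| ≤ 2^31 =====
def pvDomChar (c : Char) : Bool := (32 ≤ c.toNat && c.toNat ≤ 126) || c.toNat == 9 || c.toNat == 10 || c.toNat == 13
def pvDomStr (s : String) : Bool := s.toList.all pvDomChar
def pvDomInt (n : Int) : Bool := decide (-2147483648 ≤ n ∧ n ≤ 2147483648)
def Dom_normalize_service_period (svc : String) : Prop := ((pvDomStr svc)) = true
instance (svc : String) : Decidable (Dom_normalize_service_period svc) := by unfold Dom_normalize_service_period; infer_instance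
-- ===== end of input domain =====

-- B replaces A's sequence of 12 whole-string str.replace passes by one left-to-right scan that
-- abbreviates whichever month name starts at each position (alternative algorithm, same cost class);
-- on text containing "januaryovember"/"juneovember" A's cascading replacement also abbreviates a
-- manufactured "november", B abbreviates only months present in the input (see D_ below).


-- ===== PORT A =====
-- helper `clean` of A's module
def cleanA (s : String) : String :=
  if s = "" then "" else PySem.Str.lower (PySem.Str.strip (PySem.Str.replace s "\x07" ""))

def month_mappings : List (String × String) :=
  [("january", "jan"), ("february", "feb"), ("march", "mar"),
   ("april", "apr"), ("may", "may"), ("june", "jun"),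
   ("july", "jul"), ("august", "aug"), ("september", "sep"),
   ("october", "oct"), ("november", "nov"), ("december", "dec")]

def normalize_service_period (svc : String) : String :=
  if svc = "" then ""
  else
    let s1 := PySem.Str.lower (cleanA svc)
    let s2 := month_mappings.foldl (fun acc p => PySem.Str.replace acc p.1 p.2) s1
    PySem.Str.join " " (PySem.Str.split₀ s2)

-- ===== PORT B =====
def monthsB : List (List Char × List Char) :=
  [("january".toList, "jan".toList), ("february".toList, "feb".toList), ("march".toList, "mar".toList),
   ("april".toList, "apr".toList), ("may".toList, "may".toList), ("june".toList, "jun".toList),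
   ("july".toList, "jul".toList), ("august".toList, "aug".toList), ("september".toList, "sep".toList),
   ("october".toList, "oct".toList), ("november".toList, "nov".toList), ("december".toList, "dec".toList)]

-- Source B's inner `for full, abbr in MONTHS: if s.startswith(full, i) ... break / else` loop:
-- first table entry matching at the current position (with the rest of the string after it)
def matchMonth (l : List Char) : List (List Char × List Char) → Option (List Char × List Char)
  | [] => none
  | (full, ab) :: ms => if full.isPrefixOf l then some (ab, l.drop full.length) else matchMonth l ms

-- Source B's `while i < n` scan, hand-ported with fuel (exact: each iteration consumes ≥ 1 character,
-- so fuel = length of the scanned text suffices and the fuel-0 branch is never reached)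
def scanGo : Nat → List Char → List Char
  | 0, l => l
  | _ + 1, [] => []
  | fuel + 1, c :: t =>
    match matchMonth (c :: t) monthsB with
    | some (ab, rest) => ab ++ scanGo fuel rest
    | none => c :: scanGo fuel t

def normalize_service_period_alt (svc : String) : String :=
  if svc = "" then ""
  else
    let s := cleanA svc
    let res := String.ofList (scanGo s.toList.length s.toList)
    PySem.Str.join " " (PySem.Str.split₀ res)

-- ===== PRECONDITION & SPEC =====
-- On inputs whose lowercased text contains "januaryovember" or "juneovember", A's sequential
-- replacement manufactures a new "november" occurrence out of the emitted "jan"/"jun" plus the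
-- following text and abbreviates it too (e.g. "januaryovember" -> "janov"), while B abbreviates
-- only month names present in the input ("janovember"), which is the intended normalization.
def D_normalize_service_period (svc : String) : Prop :=
  PySem.Str.isIn "januaryovember" (PySem.Str.lower svc) = true ∨
  PySem.Str.isIn "juneovember" (PySem.Str.lower svc) = true
instance (svc : String) : Decidable (D_normalize_service_period svc) := by
  unfold D_normalize_service_period; infer_instance

def Spec_normalize_service_period (svc : String) (out : String) : Prop :=
  ¬ D_normalize_service_period svc → out = normalize_service_period_alt svc
instance (svc : String) (out : String) : Decidable (Spec_normalize_service_period svc out) := by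
  unfold Spec_normalize_service_period; infer_instance

def pvDiffWitness_normalize_service_period : String := "januaryovember"
def pvDiffWitnessOut_normalize_service_period : String × String := ("janov", "janovember")

-- ===== CLAIM (what is proved, stated in full; the proofs are below) =====
def Claim_unchanged_normalize_service_period : Prop :=
  ∀ (svc : String), Dom_normalize_service_period svc →
    Spec_normalize_service_period svc (normalize_service_period svc)
def Claim_changed_normalize_service_period : Prop :=
  Dom_normalize_service_period (pvDiffWitness_normalize_service_period) ∧
  D_normalize_service_period (pvDiffWitness_normalize_service_period) ∧
  normalize_service_period (pvDiffWitness_normalize_service_period) = pvDiffWitnessOut_normalize_service_period.1 ∧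
  normalize_service_period_alt (pvDiffWitness_normalize_service_period) = pvDiffWitnessOut_normalize_service_period.2 ∧
  pvDiffWitnessOut_normalize_service_period.1 ≠ pvDiffWitnessOut_normalize_service_period.2
def Claim_exact_normalize_service_period : Prop :=
  ∀ (svc : String), Dom_normalize_service_period svc → D_normalize_service_period svc →
    normalize_service_period svc ≠ normalize_service_period_alt svc

-- ===== LEMMAS AND PROOFS =====
theorem charOfNat_toNat (n : Nat) (h : n < 0xd800) : (Char.ofNat n).toNat = n := by
  have hv : n.isValidChar := Or.inl h
  simp [Char.ofNat, hv, Char.ofNatAux, Char.toNat]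

theorem lowerChar_idem (c : Char) : PySem.Chars.lowerChar (PySem.Chars.lowerChar c) = PySem.Chars.lowerChar c := by
  unfold PySem.Chars.lowerChar PySem.Chars.isupper
  by_cases h : 'A' ≤ c ∧ c ≤ 'Z'
  · have hA : (65 : UInt32) ≤ c.val := h.1
    have hZ : c.val ≤ (90 : UInt32) := h.2
    have hA' : 65 ≤ c.toNat := by exact_mod_cast hA
    have hZ' : c.toNat ≤ 90 := by exact_mod_cast hZ
    have ht : (Char.ofNat (c.toNat + 32)).toNat = c.toNat + 32 := charOfNat_toNat _ (by omega)
    have hno : ¬ ('A' ≤ Char.ofNat (c.toNat + 32) ∧ Char.ofNat (c.toNat + 32) ≤ 'Z') := by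
      rintro ⟨-, h2⟩
      have : (Char.ofNat (c.toNat + 32)).toNat ≤ 90 := by
        have := h2
        rw [Char.le_def] at this
        exact_mod_cast this
      omega
    simp [h.1, h.2]
    intro h1 h2
    exact absurd ⟨h1, h2⟩ hno
  · have : ¬ ('A' ≤ c) ∨ ¬ (c ≤ 'Z') := by tauto
    rcases this with h1 | h1 <;> simp [h1]

theorem replGo_acc (old new : List Char) (f : Nat) :
    ∀ (l acc : List Char), PySem.Chars.replace.go old new f l acc = acc.reverse ++ PySem.Chars.replace.go old new f l [] := by
  induction f with
  | zero => intro l acc; simp [PySem.Chars.replace.go]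
  | succ f ih =>
    intro l acc
    cases l with
    | nil => simp [PySem.Chars.replace.go]
    | cons c t =>
      by_cases h : old.isPrefixOf (c :: t)
      · simp only [PySem.Chars.replace.go, h, if_pos]
        rw [ih _ (new.reverse ++ acc), ih _ (new.reverse ++ [])]
        simp
      · simp only [PySem.Chars.replace.go, h, if_neg, Bool.false_eq_true, not_false_iff]
        rw [ih t (c :: acc), ih t (c :: [])]
        simp

theorem replGo_fuel (old new : List Char) (hold : old ≠ []) :
    ∀ (f : Nat) (l acc : List Char), l.length ≤ f →
      PySem.Chars.replace.go old new f l acc = PySem.Chars.replace.go old new l.length l acc := by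
  intro f
  induction f using Nat.strong_induction_on with
  | _ f ih =>
    match f with
    | 0 =>
      intro l acc h
      have : l = [] := List.length_eq_zero_iff.mp (Nat.le_zero.mp h)
      subst this; rfl
    | f + 1 =>
      intro l acc h
      cases l with
      | nil => simp [PySem.Chars.replace.go]
      | cons c t =>
        have h' : t.length ≤ f := by simp at h; omega
        by_cases hp : old.isPrefixOf (c :: t)
        · have hlen : (List.drop old.length (c :: t)).length ≤ t.length := by
            have : 1 ≤ old.length := by
              cases old with
              | nil => exact absurd rfl hold
              | cons _ _ => simp
            simp [List.length_drop]; omega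
          simp only [PySem.Chars.replace.go, hp, if_pos, List.length_cons]
          rw [ih f (by omega) _ _ (le_trans hlen h'),
              ih t.length (by omega) _ _ hlen]
        · simp only [PySem.Chars.replace.go, hp, if_neg, Bool.false_eq_true, not_false_iff, List.length_cons]
          rw [ih f (by omega) t _ h']

theorem repl_nil (old new : List Char) (hold : old ≠ []) : PySem.Chars.replace [] old new = [] := by
  have : old.isEmpty = false := by simp [hold]
  simp [PySem.Chars.replace, this, PySem.Chars.replace.go]

theorem repl_cons_not_prefix (old new : List Char) (c : Char) (t : List Char)
    (h : ¬ old <+: (c :: t)) :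
    PySem.Chars.replace (c :: t) old new = c :: PySem.Chars.replace t old new := by
  have hold : old ≠ [] := by rintro rfl; exact h (List.nil_prefix)
  have hempty : old.isEmpty = false := by simp [hold]
  have hp : old.isPrefixOf (c :: t) = false := by
    rw [Bool.eq_false_iff]; intro hh; exact h (List.isPrefixOf_iff_prefix.mp hh)
  simp only [PySem.Chars.replace, hempty, Bool.false_eq_true, if_neg, not_false_iff, List.length_cons]
  rw [show PySem.Chars.replace.go old new (t.length + 1) (c :: t) [] =
      PySem.Chars.replace.go old new t.length t [c] by
    simp [PySem.Chars.replace.go, hp]]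
  rw [replGo_acc]
  rfl

theorem repl_head (old new s : List Char) (hold : old ≠ []) (h : old <+: s) :
    PySem.Chars.replace s old new = new ++ PySem.Chars.replace (s.drop old.length) old new := by
  have hempty : old.isEmpty = false := by simp [hold]
  cases s with
  | nil =>
    have : old = [] := List.prefix_nil.mp h
    exact absurd this hold
  | cons c t =>
    have hp : old.isPrefixOf (c :: t) = true := List.isPrefixOf_iff_prefix.mpr h
    have h1 : 1 ≤ old.length := by
      cases old with
      | nil => exact absurd rfl hold
      | cons _ _ => simp
    have hlen : (List.drop old.length (c :: t)).length ≤ t.length := by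
      simp [List.length_drop]; omega
    simp only [PySem.Chars.replace, hempty, Bool.false_eq_true, if_neg, not_false_iff, List.length_cons]
    rw [show PySem.Chars.replace.go old new (t.length + 1) (c :: t) [] =
        PySem.Chars.replace.go old new t.length (List.drop old.length (c :: t)) new.reverse by
      simp [PySem.Chars.replace.go, hp]]
    rw [replGo_acc, replGo_fuel old new hold t.length _ [] hlen]
    simp

theorem repl_no_occ (old new s : List Char) (hold : old ≠ []) (h : ¬ old <:+: s) :
    PySem.Chars.replace s old new = s := by
  induction s with
  | nil => exact repl_nil old new hold
  | cons c t ih =>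
    rw [repl_cons_not_prefix old new c t (fun hp => h hp.isInfix),
        ih (fun hi => h (List.infix_cons hi))]


-- "no occurrence of old can start anywhere inside pre": a mismatch is already visible inside pre
def blockedAt (old pre : List Char) : Prop :=
  ∀ p, p < pre.length → ∃ j, j < old.length ∧ p + j < pre.length ∧ old[j]? ≠ pre[p + j]?

theorem not_prefix_of_mismatch {old pre : List Char} {p : Nat}
    (hm : ∃ j, j < old.length ∧ p + j < pre.length ∧ old[j]? ≠ pre[p + j]?)
    (u : List Char) : ¬ old <+: (pre.drop p ++ u) := by
  intro h
  obtain ⟨j, hj, hpj, hne⟩ := hm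
  obtain ⟨w, hw⟩ := h
  apply hne
  have h1 : (pre.drop p ++ u)[j]? = old[j]? := by rw [← hw, List.getElem?_append_left hj]
  have h2 : (pre.drop p ++ u)[j]? = (pre.drop p)[j]? :=
    List.getElem?_append_left (by simp [List.length_drop]; omega)
  rw [h1, List.getElem?_drop] at h2
  exact h2

theorem blocked_not_prefix {old pre : List Char} (hb : blockedAt old pre) {p : Nat}
    (hp : p < pre.length) (u : List Char) : ¬ old <+: (pre.drop p ++ u) :=
  not_prefix_of_mismatch (hb p hp) u

theorem blockedAt_tail {old : List Char} {c : Char} {pr : List Char}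
    (hb : blockedAt old (c :: pr)) : blockedAt old pr := by
  intro p hp
  obtain ⟨j, hj, hpj, hne⟩ := hb (p + 1) (by simp; omega)
  refine ⟨j, hj, by simp at hpj; omega, ?_⟩
  have he : p + 1 + j = (p + j) + 1 := by omega
  rw [he, List.getElem?_cons_succ] at hne
  exact hne

theorem repl_pre_blocked (old new : List Char) :
    ∀ (pre : List Char), blockedAt old pre →
      ∀ u, PySem.Chars.replace (pre ++ u) old new = pre ++ PySem.Chars.replace u old new := by
  intro pre
  induction pre with
  | nil => intro _ u; rfl
  | cons c pr ih =>
    intro hb u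
    have h0 : ¬ old <+: ((c :: pr).drop 0 ++ u) := blocked_not_prefix hb (by simp) u
    simp only [List.drop_zero] at h0
    rw [List.cons_append, repl_cons_not_prefix old new c (pr ++ u) h0, ih (blockedAt_tail hb) u]
    rfl

-- A's replacement loop over a table, on the char-list side
def replFold (ms : List (List Char × List Char)) (s : List Char) : List Char :=
  ms.foldl (fun acc p => PySem.Chars.replace acc p.1 p.2) s

theorem replFold_cons (p : List Char × List Char) (ms : List (List Char × List Char)) (s : List Char) :
    replFold (p :: ms) s = replFold ms (PySem.Chars.replace s p.1 p.2) := rfl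

theorem replFold_nil_input (ms : List (List Char × List Char)) (h : ∀ p ∈ ms, p.1 ≠ []) :
    replFold ms [] = [] := by
  induction ms with
  | nil => rfl
  | cons p ms ih =>
    rw [replFold_cons, repl_nil _ _ (h p (by simp))]
    exact ih (fun q hq => h q (by simp [hq]))

-- proper suffixes of a pattern P survive one replacement pass backwards, provided the
-- abbreviation never starts a proper suffix of P
theorem suffix_chain (full abbr P : List Char) (hfa : abbr <+: full) (hfull : full ≠ [])
    (hblock : ∀ j, 1 ≤ j → ¬ abbr <+: P.drop j) :
    ∀ (n : Nat) (u : List Char), u.length ≤ n → ∀ j, 1 ≤ j →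
      P.drop j <+: PySem.Chars.replace u full abbr → P.drop j <+: u := by
  intro n
  induction n with
  | zero =>
    intro u hu j hj h
    have : u = [] := List.length_eq_zero_iff.mp (Nat.le_zero.mp hu)
    subst this
    rwa [repl_nil _ _ hfull] at h
  | succ n ihn =>
    intro u hu j hj h
    by_cases hp : full <+: u
    · rw [repl_head full abbr u hfull hp] at h
      have hcases : P.drop j <+: abbr ∨ abbr <+: P.drop j :=
        List.prefix_or_prefix_of_prefix h (List.prefix_append abbr _)
      rcases hcases with hc | hc
      · exact (hc.trans hfa).trans hp
      · exact absurd hc (hblock j hj)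
    · cases u with
      | nil => rwa [repl_nil _ _ hfull] at h
      | cons c t =>
        rw [repl_cons_not_prefix _ _ _ _ hp] at h
        cases hS : P.drop j with
        | nil => simp
        | cons d S' =>
          rw [hS, List.cons_prefix_cons] at h
          obtain ⟨rfl, h'⟩ := h
          have hS' : P.drop (j + 1) = S' := by
            rw [← List.drop_drop, hS]
            rfl
          have ht : S' <+: t := by
            have := ihn t (by simp at hu; omega) (j + 1) (by omega) (by rwa [hS'])
            rwa [hS'] at this
          exact List.cons_prefix_cons.mpr ⟨rfl, ht⟩

theorem months_full_ne : ∀ p ∈ monthsB, p.1 ≠ [] := by decide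

theorem months_abbr_pre : ∀ p ∈ monthsB, p.2 <+: p.1 := by decide

theorem months_abbr_ne : ∀ p ∈ monthsB, p.2 ≠ [] := by decide

theorem months_hblock_bounded :
    ∀ p ∈ monthsB, ∀ q ∈ monthsB, ∀ j, j < q.1.length → ¬ p.2 <+: q.1.drop (j + 1) := by decide

-- no month abbreviation starts a proper suffix of any month name
theorem months_hblock : ∀ p ∈ monthsB, ∀ q ∈ monthsB, ∀ j, 1 ≤ j → ¬ p.2 <+: q.1.drop j := by
  intro p hp q hq j h1
  rcases j with _ | k
  · omega
  · by_cases hlt : k < q.1.length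
    · exact months_hblock_bounded p hp q hq k hlt
    · rw [List.drop_eq_nil_of_le (by omega)]
      intro hpre
      exact months_abbr_ne p hp (List.prefix_nil.mp hpre)

theorem suffix_chain_fold (P : List Char)
    (hblockP : ∀ p ∈ monthsB, ∀ j, 1 ≤ j → ¬ p.2 <+: P.drop j) :
    ∀ (ms : List (List Char × List Char)), (∀ p ∈ ms, p ∈ monthsB) →
      ∀ u j, 1 ≤ j → P.drop j <+: replFold ms u → P.drop j <+: u := by
  intro ms
  induction ms with
  | nil => intro _ u j _ h; exact h
  | cons p ms ih =>
    intro hsub u j hj h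
    rw [replFold_cons] at h
    have hpM : p ∈ monthsB := hsub p (by simp)
    have h1 := ih (fun q hq => hsub q (by simp [hq])) _ j hj h
    exact suffix_chain p.1 p.2 P (months_abbr_pre p hpM) (months_full_ne p hpM)
      (hblockP p hpM) u.length u le_rfl j hj h1

theorem fold_cons : ∀ (ms : List (List Char × List Char)), (∀ p ∈ ms, p ∈ monthsB) →
    ∀ (c : Char) (t : List Char), (∀ p ∈ ms, ¬ p.1 <+: (c :: t)) →
      replFold ms (c :: t) = c :: replFold ms t := by
  intro ms
  induction ms with
  | nil => intro _ c t _; rfl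
  | cons p ms ih =>
    intro hsub c t h
    have hpM : p ∈ monthsB := hsub p (by simp)
    rw [replFold_cons, repl_cons_not_prefix _ _ _ _ (h p (by simp)), replFold_cons]
    apply ih (fun q hq => hsub q (by simp [hq])) c (PySem.Chars.replace t p.1 p.2)
    intro q hq hcontra
    have hqM : q ∈ monthsB := hsub q (by simp [hq])
    cases hq1 : q.1 with
    | nil => exact months_full_ne q hqM hq1
    | cons d Q =>
      rw [hq1, List.cons_prefix_cons] at hcontra
      obtain ⟨rfl, hpre⟩ := hcontra
      have hQ : q.1.drop 1 = Q := by rw [hq1]; rfl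
      have hQt : Q <+: t := by
        have := suffix_chain p.1 p.2 q.1 (months_abbr_pre p hpM) (months_full_ne p hpM)
          (months_hblock p hpM q hqM) t.length t le_rfl 1 le_rfl (by rwa [hQ])
        rwa [hQ] at this
      exact h q (by simp [hq]) (by rw [hq1]; exact List.cons_prefix_cons.mpr ⟨rfl, hQt⟩)

theorem matchMonth_none : ∀ (ms : List (List Char × List Char)) (l : List Char),
    matchMonth l ms = none → ∀ p ∈ ms, ¬ p.1 <+: l := by
  intro ms
  induction ms with
  | nil => simp
  | cons p ms ih =>
    intro l h q hq
    obtain ⟨full, ab⟩ := p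
    by_cases hp : full.isPrefixOf l
    · simp [matchMonth, hp] at h
    · simp [matchMonth, hp] at h
      rcases (List.mem_cons.mp hq) with rfl | hq'
      · exact fun hc => (by simpa [List.isPrefixOf_iff_prefix.mpr hc] using hp)
      · exact ih l h q hq'

theorem fold_pre (w : List Char) : ∀ (ms : List (List Char × List Char)),
    (∀ p ∈ ms, blockedAt p.1 w) →
    ∀ u, replFold ms (w ++ u) = w ++ replFold ms u := by
  intro ms
  induction ms with
  | nil => intro _ u; rfl
  | cons p ms ih =>
    intro h u
    rw [replFold_cons, repl_pre_blocked p.1 p.2 w (h p (by simp)) u, replFold_cons,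
        ih (fun q hq => h q (by simp [hq])) _]

theorem key_regular (pre post : List (List Char × List Char)) (full ab : List Char)
    (hsplit : monthsB = pre ++ (full, ab) :: post)
    (hfull : full ≠ [])
    (hpre : ∀ p ∈ pre, blockedAt p.1 full) (hpost : ∀ p ∈ post, blockedAt p.1 ab)
    (u : List Char) :
    replFold monthsB (full ++ u) = ab ++ replFold monthsB u := by
  have hM : ∀ x, replFold monthsB x
      = replFold post (PySem.Chars.replace (replFold pre x) full ab) := by
    intro x; rw [hsplit]; simp [replFold, List.foldl_append]
  rw [hM, hM, fold_pre full pre hpre u,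
      repl_head full ab _ hfull (List.prefix_append full _), List.drop_left,
      fold_pre ab post hpost _]

theorem repl_nov_step (a b : Char) (ha : a ≠ 'n') (hb : b ≠ 'n') (y : List Char)
    (hy : ¬ ("ovember".toList <+: y)) :
    PySem.Chars.replace ([a, b, 'n'] ++ y) "november".toList "nov".toList
      = [a, b, 'n'] ++ PySem.Chars.replace y "november".toList "nov".toList := by
  have hnov : "november".toList = 'n'::'o'::'v'::'e'::'m'::'b'::'e'::'r'::[] := rfl
  have hov : "ovember".toList = 'o'::'v'::'e'::'m'::'b'::'e'::'r'::[] := rfl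
  have h1 : ¬ "november".toList <+: (a :: b :: 'n' :: y) := by
    intro hc; rw [hnov, List.cons_prefix_cons] at hc; exact ha hc.1.symm
  have h2 : ¬ "november".toList <+: (b :: 'n' :: y) := by
    intro hc; rw [hnov, List.cons_prefix_cons] at hc; exact hb hc.1.symm
  have h3 : ¬ "november".toList <+: ('n' :: y) := by
    intro hc; rw [hnov, List.cons_prefix_cons] at hc
    exact hy (by rw [hov]; exact hc.2)
  show PySem.Chars.replace (a :: b :: 'n' :: y) _ _ = _
  rw [repl_cons_not_prefix _ _ _ _ h1, repl_cons_not_prefix _ _ _ _ h2,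
      repl_cons_not_prefix _ _ _ _ h3]
  rfl

theorem key_special (pre mid : List (List Char × List Char)) (full ab : List Char) (a b : Char)
    (hab : ab = [a, b, 'n']) (ha : a ≠ 'n') (hb : b ≠ 'n')
    (hsplit : monthsB = pre ++ (full, ab) :: mid ++
      ("november".toList, "nov".toList) :: [("december".toList, "dec".toList)])
    (hfull : full ≠ [])
    (hpre : ∀ p ∈ pre, blockedAt p.1 full)
    (hmid : ∀ p ∈ mid, blockedAt p.1 ab)
    (hdec : blockedAt "december".toList ab)
    (hsubm : ∀ p ∈ pre ++ (full, ab) :: mid, p ∈ monthsB)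
    (u : List Char) (hovem : ¬ ("ovember".toList <+: u)) :
    replFold monthsB (full ++ u) = ab ++ replFold monthsB u := by
  have hM : ∀ x, replFold monthsB x
      = PySem.Chars.replace
          (PySem.Chars.replace (replFold mid (PySem.Chars.replace (replFold pre x) full ab))
            "november".toList "nov".toList)
          "december".toList "dec".toList := by
    intro x; rw [hsplit]; simp [replFold, List.foldl_append]
  have hy1 : ¬ ("ovember".toList <+:
      replFold mid (PySem.Chars.replace (replFold pre u) full ab)) := by
    intro hc
    apply hovem
    have hrw : replFold mid (PySem.Chars.replace (replFold pre u) full ab)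
        = replFold (pre ++ (full, ab) :: mid) u := by
      simp [replFold, List.foldl_append]
    have hc' : ("november".toList).drop 1 <+: replFold (pre ++ (full, ab) :: mid) u := by
      rw [← hrw]; exact hc
    have := suffix_chain_fold "november".toList
      (fun p hp => months_hblock p hp ("november".toList, "nov".toList) (by decide))
      _ hsubm u 1 le_rfl hc'
    exact this
  rw [hM, hM, fold_pre full pre hpre u,
      repl_head full ab _ hfull (List.prefix_append full _), List.drop_left,
      fold_pre ab mid hmid _, hab,
      repl_nov_step a b ha hb _ (by rw [← hab]; exact hy1), ← hab,
      repl_pre_blocked "december".toList "dec".toList ab hdec _]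

theorem scanGo_some {fuel : Nat} {c : Char} {t ab rest : List Char}
    (h : matchMonth (c :: t) monthsB = some (ab, rest)) :
    scanGo (fuel + 1) (c :: t) = ab ++ scanGo fuel rest := by
  simp [scanGo, h]

theorem scanGo_none {fuel : Nat} {c : Char} {t : List Char}
    (h : matchMonth (c :: t) monthsB = none) :
    scanGo (fuel + 1) (c :: t) = c :: scanGo fuel t := by
  simp [scanGo, h]

theorem infix_lift {P u full : List Char} {c : Char} {t : List Char} (hu : full ++ u = c :: t)
    (h : P <:+: u) : P <:+: (c :: t) := by
  rw [← hu]
  exact h.trans (List.suffix_append full u).isInfix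

theorem branch_len {full u : List Char} {c : Char} {t : List Char} {fuel : Nat}
    (hu : full ++ u = c :: t) (hfl : full ≠ []) (hs : (c :: t).length ≤ fuel + 1) :
    u.length ≤ fuel := by
  have hlen := congrArg List.length hu
  rw [List.length_append] at hlen
  have h1 : 0 < full.length := List.length_pos_iff.mpr hfl
  simp only [List.length_cons] at hlen hs
  omega

theorem branch_step (fuel : Nat) (full ab : List Char) (c : Char) (t u : List Char)
    (hu : full ++ u = c :: t)
    (hkey : replFold monthsB (full ++ u) = ab ++ replFold monthsB u)
    (ihu : replFold monthsB u = scanGo fuel u) :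
    replFold monthsB (c :: t) = ab ++ scanGo fuel ((c :: t).drop full.length) := by
  rw [← hu, List.drop_left, hkey, ihu]

theorem matchMonth_some_elim {l : List Char} :
    ∀ (ms : List (List Char × List Char)) {ab rest : List Char},
      matchMonth l ms = some (ab, rest) →
      ∃ p ∈ ms, p.1 <+: l ∧ ab = p.2 ∧ rest = l.drop p.1.length := by
  intro ms
  induction ms with
  | nil => intro ab rest h; simp [matchMonth] at h
  | cons p ms ih =>
    intro ab rest h
    obtain ⟨full, ab'⟩ := p
    by_cases hp : full.isPrefixOf l
    · simp only [matchMonth, hp, if_pos, Option.some.injEq, Prod.mk.injEq] at h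
      exact ⟨(full, ab'), by simp, List.isPrefixOf_iff_prefix.mp hp, h.1.symm, h.2.symm⟩
    · simp only [matchMonth, hp, Bool.false_eq_true, if_neg, not_false_iff] at h
      obtain ⟨q, hq, h1, h2, h3⟩ := ih h
      exact ⟨q, by simp [hq], h1, h2, h3⟩

set_option maxHeartbeats 1000000 in
theorem scan_eq : ∀ (fuel : Nat) (s : List Char), s.length ≤ fuel →
    ¬ ("januaryovember".toList <:+: s) → ¬ ("juneovember".toList <:+: s) →
    replFold monthsB s = scanGo fuel s := by
  intro fuel
  induction fuel with
  | zero =>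
    intro s hs _ _
    have hnil : s = [] := List.length_eq_zero_iff.mp (Nat.le_zero.mp hs)
    subst hnil
    rw [replFold_nil_input monthsB months_full_ne]
    rfl
  | succ fuel ih =>
    intro s hs H1 H2
    cases s with
    | nil => rw [replFold_nil_input monthsB months_full_ne]; rfl
    | cons c t =>
      cases hm : matchMonth (c :: t) monthsB with
      | none =>
        rw [fold_cons monthsB (fun p hp => hp) c t (matchMonth_none monthsB _ hm),
            scanGo_none hm,
            ih t (by simp only [List.length_cons] at hs; omega)
              (fun hi => H1 (List.infix_cons hi)) (fun hi => H2 (List.infix_cons hi))]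
      | some r =>
        obtain ⟨ab, rest⟩ := r
        obtain ⟨p, hpmem, hpre, hab, hrest⟩ := matchMonth_some_elim monthsB hm
        subst hab
        subst hrest
        simp only [monthsB, List.mem_cons, List.not_mem_nil, or_false] at hpmem
        rcases hpmem with rfl | rfl | rfl | rfl | rfl | rfl | rfl | rfl | rfl | rfl | rfl | rfl
        · obtain ⟨u, hu⟩ := hpre
          rw [scanGo_some hm]
          have hovem : ¬ ("ovember".toList <+: u) := by
            intro hc
            apply H1
            have hcat : "januaryovember".toList = "january".toList ++ "ovember".toList := by decide
            have hpref : "januaryovember".toList <+: (c :: t) := by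
              rw [← hu, hcat]
              exact (List.prefix_append_right_inj _).mpr hc
            exact hpref.isInfix
          exact branch_step fuel _ _ c t u hu
            (key_special [] [("february".toList, "feb".toList), ("march".toList, "mar".toList), ("april".toList, "apr".toList), ("may".toList, "may".toList), ("june".toList, "jun".toList), ("july".toList, "jul".toList), ("august".toList, "aug".toList), ("september".toList, "sep".toList), ("october".toList, "oct".toList)] "january".toList "jan".toList 'j' 'a'
              (by decide) (by decide) (by decide) (by decide) (by decide)
              (by unfold blockedAt; decide) (by unfold blockedAt; decide) (by unfold blockedAt; decide)
              (by decide) u hovem)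
            (ih u (branch_len hu (by decide) hs)
              (fun hP => H1 (infix_lift hu hP)) (fun hP => H2 (infix_lift hu hP)))
        · obtain ⟨u, hu⟩ := hpre
          rw [scanGo_some hm]
          exact branch_step fuel _ _ c t u hu
            (key_regular [("january".toList, "jan".toList)] [("march".toList, "mar".toList), ("april".toList, "apr".toList), ("may".toList, "may".toList), ("june".toList, "jun".toList), ("july".toList, "jul".toList), ("august".toList, "aug".toList), ("september".toList, "sep".toList), ("october".toList, "oct".toList), ("november".toList, "nov".toList), ("december".toList, "dec".toList)] "february".toList "feb".toList (by decide) (by decide)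
              (by unfold blockedAt; decide) (by unfold blockedAt; decide) u)
            (ih u (branch_len hu (by decide) hs)
              (fun hP => H1 (infix_lift hu hP)) (fun hP => H2 (infix_lift hu hP)))
        · obtain ⟨u, hu⟩ := hpre
          rw [scanGo_some hm]
          exact branch_step fuel _ _ c t u hu
            (key_regular [("january".toList, "jan".toList), ("february".toList, "feb".toList)] [("april".toList, "apr".toList), ("may".toList, "may".toList), ("june".toList, "jun".toList), ("july".toList, "jul".toList), ("august".toList, "aug".toList), ("september".toList, "sep".toList), ("october".toList, "oct".toList), ("november".toList, "nov".toList), ("december".toList, "dec".toList)] "march".toList "mar".toList (by decide) (by decide)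
              (by unfold blockedAt; decide) (by unfold blockedAt; decide) u)
            (ih u (branch_len hu (by decide) hs)
              (fun hP => H1 (infix_lift hu hP)) (fun hP => H2 (infix_lift hu hP)))
        · obtain ⟨u, hu⟩ := hpre
          rw [scanGo_some hm]
          exact branch_step fuel _ _ c t u hu
            (key_regular [("january".toList, "jan".toList), ("february".toList, "feb".toList), ("march".toList, "mar".toList)] [("may".toList, "may".toList), ("june".toList, "jun".toList), ("july".toList, "jul".toList), ("august".toList, "aug".toList), ("september".toList, "sep".toList), ("october".toList, "oct".toList), ("november".toList, "nov".toList), ("december".toList, "dec".toList)] "april".toList "apr".toList (by decide) (by decide)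
              (by unfold blockedAt; decide) (by unfold blockedAt; decide) u)
            (ih u (branch_len hu (by decide) hs)
              (fun hP => H1 (infix_lift hu hP)) (fun hP => H2 (infix_lift hu hP)))
        · obtain ⟨u, hu⟩ := hpre
          rw [scanGo_some hm]
          exact branch_step fuel _ _ c t u hu
            (key_regular [("january".toList, "jan".toList), ("february".toList, "feb".toList), ("march".toList, "mar".toList), ("april".toList, "apr".toList)] [("june".toList, "jun".toList), ("july".toList, "jul".toList), ("august".toList, "aug".toList), ("september".toList, "sep".toList), ("october".toList, "oct".toList), ("november".toList, "nov".toList), ("december".toList, "dec".toList)] "may".toList "may".toList (by decide) (by decide)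
              (by unfold blockedAt; decide) (by unfold blockedAt; decide) u)
            (ih u (branch_len hu (by decide) hs)
              (fun hP => H1 (infix_lift hu hP)) (fun hP => H2 (infix_lift hu hP)))
        · obtain ⟨u, hu⟩ := hpre
          rw [scanGo_some hm]
          have hovem : ¬ ("ovember".toList <+: u) := by
            intro hc
            apply H2
            have hcat : "juneovember".toList = "june".toList ++ "ovember".toList := by decide
            have hpref : "juneovember".toList <+: (c :: t) := by
              rw [← hu, hcat]
              exact (List.prefix_append_right_inj _).mpr hc
            exact hpref.isInfix
          exact branch_step fuel _ _ c t u hu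
            (key_special [("january".toList, "jan".toList), ("february".toList, "feb".toList), ("march".toList, "mar".toList), ("april".toList, "apr".toList), ("may".toList, "may".toList)] [("july".toList, "jul".toList), ("august".toList, "aug".toList), ("september".toList, "sep".toList), ("october".toList, "oct".toList)] "june".toList "jun".toList 'j' 'u'
              (by decide) (by decide) (by decide) (by decide) (by decide)
              (by unfold blockedAt; decide) (by unfold blockedAt; decide) (by unfold blockedAt; decide)
              (by decide) u hovem)
            (ih u (branch_len hu (by decide) hs)
              (fun hP => H1 (infix_lift hu hP)) (fun hP => H2 (infix_lift hu hP)))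
        · obtain ⟨u, hu⟩ := hpre
          rw [scanGo_some hm]
          exact branch_step fuel _ _ c t u hu
            (key_regular [("january".toList, "jan".toList), ("february".toList, "feb".toList), ("march".toList, "mar".toList), ("april".toList, "apr".toList), ("may".toList, "may".toList), ("june".toList, "jun".toList)] [("august".toList, "aug".toList), ("september".toList, "sep".toList), ("october".toList, "oct".toList), ("november".toList, "nov".toList), ("december".toList, "dec".toList)] "july".toList "jul".toList (by decide) (by decide)
              (by unfold blockedAt; decide) (by unfold blockedAt; decide) u)
            (ih u (branch_len hu (by decide) hs)
              (fun hP => H1 (infix_lift hu hP)) (fun hP => H2 (infix_lift hu hP)))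
        · obtain ⟨u, hu⟩ := hpre
          rw [scanGo_some hm]
          exact branch_step fuel _ _ c t u hu
            (key_regular [("january".toList, "jan".toList), ("february".toList, "feb".toList), ("march".toList, "mar".toList), ("april".toList, "apr".toList), ("may".toList, "may".toList), ("june".toList, "jun".toList), ("july".toList, "jul".toList)] [("september".toList, "sep".toList), ("october".toList, "oct".toList), ("november".toList, "nov".toList), ("december".toList, "dec".toList)] "august".toList "aug".toList (by decide) (by decide)
              (by unfold blockedAt; decide) (by unfold blockedAt; decide) u)
            (ih u (branch_len hu (by decide) hs)
              (fun hP => H1 (infix_lift hu hP)) (fun hP => H2 (infix_lift hu hP)))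
        · obtain ⟨u, hu⟩ := hpre
          rw [scanGo_some hm]
          exact branch_step fuel _ _ c t u hu
            (key_regular [("january".toList, "jan".toList), ("february".toList, "feb".toList), ("march".toList, "mar".toList), ("april".toList, "apr".toList), ("may".toList, "may".toList), ("june".toList, "jun".toList), ("july".toList, "jul".toList), ("august".toList, "aug".toList)] [("october".toList, "oct".toList), ("november".toList, "nov".toList), ("december".toList, "dec".toList)] "september".toList "sep".toList (by decide) (by decide)
              (by unfold blockedAt; decide) (by unfold blockedAt; decide) u)
            (ih u (branch_len hu (by decide) hs)
              (fun hP => H1 (infix_lift hu hP)) (fun hP => H2 (infix_lift hu hP)))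
        · obtain ⟨u, hu⟩ := hpre
          rw [scanGo_some hm]
          exact branch_step fuel _ _ c t u hu
            (key_regular [("january".toList, "jan".toList), ("february".toList, "feb".toList), ("march".toList, "mar".toList), ("april".toList, "apr".toList), ("may".toList, "may".toList), ("june".toList, "jun".toList), ("july".toList, "jul".toList), ("august".toList, "aug".toList), ("september".toList, "sep".toList)] [("november".toList, "nov".toList), ("december".toList, "dec".toList)] "october".toList "oct".toList (by decide) (by decide)
              (by unfold blockedAt; decide) (by unfold blockedAt; decide) u)
            (ih u (branch_len hu (by decide) hs)
              (fun hP => H1 (infix_lift hu hP)) (fun hP => H2 (infix_lift hu hP)))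
        · obtain ⟨u, hu⟩ := hpre
          rw [scanGo_some hm]
          exact branch_step fuel _ _ c t u hu
            (key_regular [("january".toList, "jan".toList), ("february".toList, "feb".toList), ("march".toList, "mar".toList), ("april".toList, "apr".toList), ("may".toList, "may".toList), ("june".toList, "jun".toList), ("july".toList, "jul".toList), ("august".toList, "aug".toList), ("september".toList, "sep".toList), ("october".toList, "oct".toList)] [("december".toList, "dec".toList)] "november".toList "nov".toList (by decide) (by decide)
              (by unfold blockedAt; decide) (by unfold blockedAt; decide) u)
            (ih u (branch_len hu (by decide) hs)
              (fun hP => H1 (infix_lift hu hP)) (fun hP => H2 (infix_lift hu hP)))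
        · obtain ⟨u, hu⟩ := hpre
          rw [scanGo_some hm]
          exact branch_step fuel _ _ c t u hu
            (key_regular [("january".toList, "jan".toList), ("february".toList, "feb".toList), ("march".toList, "mar".toList), ("april".toList, "apr".toList), ("may".toList, "may".toList), ("june".toList, "jun".toList), ("july".toList, "jul".toList), ("august".toList, "aug".toList), ("september".toList, "sep".toList), ("october".toList, "oct".toList), ("november".toList, "nov".toList)] [] "december".toList "dec".toList (by decide) (by decide)
              (by unfold blockedAt; decide) (by unfold blockedAt; decide) u)
            (ih u (branch_len hu (by decide) hs)
              (fun hP => H1 (infix_lift hu hP)) (fun hP => H2 (infix_lift hu hP)))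

theorem strFold : ∀ (ms : List (String × String)) (s : String),
    (ms.foldl (fun acc p => PySem.Str.replace acc p.1 p.2) s).toList
      = replFold (ms.map fun p => (p.1.toList, p.2.toList)) s.toList := by
  intro ms
  induction ms with
  | nil => intro s; rfl
  | cons p ms ih =>
    intro s
    rw [List.foldl_cons, ih, List.map_cons, replFold_cons]
    simp [PySem.Str.replace, String.toList_ofList]

theorem strip_infix (l : List Char) : PySem.Chars.strip l <:+: l := by
  unfold PySem.Chars.strip PySem.Chars.rstrip PySem.Chars.lstrip
  have h1 : List.dropWhile PySem.Chars.isspace l <:+ l := List.dropWhile_suffix _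
  have h2 : (List.dropWhile PySem.Chars.isspace
      (List.dropWhile PySem.Chars.isspace l).reverse).reverse
      <+: List.dropWhile PySem.Chars.isspace l := by
    conv_rhs => rw [← List.reverse_reverse (List.dropWhile PySem.Chars.isspace l)]
    exact List.reverse_prefix.mpr (List.dropWhile_suffix _)
  exact h2.isInfix.trans h1.isInfix

theorem bel_id (svc : String) (hDom : Dom_normalize_service_period svc) :
    (PySem.Str.replace svc "\x07" "").toList = svc.toList := by
  have h7 : "\x07".toList = ['\x07'] := rfl
  have : PySem.Chars.replace svc.toList "\x07".toList "".toList = svc.toList := by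
    apply repl_no_occ _ _ _ (by decide)
    intro hinf
    have hmem : '\x07' ∈ svc.toList := hinf.subset (by rw [h7]; simp)
    have := List.all_eq_true.mp hDom _ hmem
    simp [pvDomChar] at this
  simpa [PySem.Str.replace, String.toList_ofList] using this

theorem h_transfer (svc : String) (hDom : Dom_normalize_service_period svc) (pat : String)
    (hinf : pat.toList <:+: (cleanA svc).toList) (hsv : ¬ svc = "") :
    PySem.Str.isIn pat (PySem.Str.lower svc) = true := by
  rw [PySem.Str.isIn_iff_infix]
  have hB : (cleanA svc).toList
      = List.map PySem.Chars.lowerChar (PySem.Chars.strip svc.toList) := by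
    simp [cleanA, hsv, PySem.Str.lower, PySem.Str.strip, String.toList_ofList,
      PySem.Chars.lower, bel_id svc hDom]
  rw [hB] at hinf
  have hmap : List.map PySem.Chars.lowerChar (PySem.Chars.strip svc.toList)
      <:+: List.map PySem.Chars.lowerChar svc.toList :=
    (strip_infix svc.toList).map PySem.Chars.lowerChar
  have : pat.toList <:+: List.map PySem.Chars.lowerChar svc.toList := hinf.trans hmap
  simpa [PySem.Str.lower, String.toList_ofList, PySem.Chars.lower] using this

theorem lower_cleanA (svc : String) (hsv : ¬ svc = "") :
    (PySem.Str.lower (cleanA svc)).toList = (cleanA svc).toList := by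
  simp [cleanA, hsv, PySem.Str.lower, String.toList_ofList, PySem.Chars.lower,
    List.map_map]
  exact fun c _ => lowerChar_idem c

theorem main_eq (svc : String) (hDom : Dom_normalize_service_period svc)
    (hND : ¬ D_normalize_service_period svc) :
    normalize_service_period svc = normalize_service_period_alt svc := by
  by_cases hsv : svc = ""
  · simp [normalize_service_period, normalize_service_period_alt, hsv]
  · have hA : normalize_service_period svc
        = PySem.Str.join " " (PySem.Str.split₀ (month_mappings.foldl
            (fun acc p => PySem.Str.replace acc p.1 p.2) (PySem.Str.lower (cleanA svc)))) := by
      simp [normalize_service_period, hsv]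
    have hB : normalize_service_period_alt svc
        = PySem.Str.join " " (PySem.Str.split₀ (String.ofList
            (scanGo (cleanA svc).toList.length (cleanA svc).toList))) := by
      simp [normalize_service_period_alt, hsv]
    rw [hA, hB]
    apply congrArg (fun x => PySem.Str.join " " (PySem.Str.split₀ x))
    -- the two intermediate strings agree
    have hlists := lower_cleanA svc hsv
    have hH1 : ¬ ("januaryovember".toList <:+: (cleanA svc).toList) := by
      intro hinf
      exact hND (Or.inl (h_transfer svc hDom "januaryovember" hinf hsv))
    have hH2 : ¬ ("juneovember".toList <:+: (cleanA svc).toList) := by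
      intro hinf
      exact hND (Or.inr (h_transfer svc hDom "juneovember" hinf hsv))
    have hmap : month_mappings.map (fun p => (p.1.toList, p.2.toList)) = monthsB := by decide
    have hfold := strFold month_mappings (PySem.Str.lower (cleanA svc))
    rw [hmap, hlists] at hfold
    have hscan := scan_eq (cleanA svc).toList.length (cleanA svc).toList le_rfl hH1 hH2
    have h1 := congrArg String.ofList (hfold.trans hscan)
    rwa [String.ofList_toList] at h1

theorem matchMonth_none_of : ∀ (ms : List (List Char × List Char)) (l : List Char),
    (∀ p ∈ ms, ¬ p.1 <+: l) → matchMonth l ms = none := by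
  intro ms
  induction ms with
  | nil => intro l _; rfl
  | cons p ms ih =>
    intro l h
    obtain ⟨full, ab⟩ := p
    have hp : full.isPrefixOf l = false := by
      rw [Bool.eq_false_iff]
      intro hc
      exact h (full, ab) (by simp) (List.isPrefixOf_iff_prefix.mp hc)
    simp only [matchMonth, hp, Bool.false_eq_true, if_neg, not_false_iff]
    exact ih l (fun q hq => h q (by simp [hq]))

theorem scanGo_fuel : ∀ (f : Nat) (l : List Char), l.length ≤ f →
    scanGo f l = scanGo l.length l := by
  intro f
  induction f using Nat.strong_induction_on with
  | _ f ih =>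
    match f with
    | 0 =>
      intro l h
      have : l = [] := List.length_eq_zero_iff.mp (Nat.le_zero.mp h)
      subst this; rfl
    | f + 1 =>
      intro l h
      cases l with
      | nil => rfl
      | cons c t =>
        have h' : t.length ≤ f := by simp at h; omega
        cases hm : matchMonth (c :: t) monthsB with
        | none =>
          rw [scanGo_none hm, show (c :: t).length = t.length + 1 from rfl,
              scanGo_none hm, ih f (by omega) t h', ih t.length (by omega) t le_rfl]
        | some r =>
          obtain ⟨ab, rest⟩ := r
          obtain ⟨p, hpmem, hpre, hab, hrest⟩ := matchMonth_some_elim monthsB hm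
          have h1 : 0 < p.1.length := List.length_pos_iff.mpr (months_full_ne p hpmem)
          have hr : rest.length ≤ t.length := by
            subst hrest; simp [List.length_drop]; omega
          rw [scanGo_some hm, show (c :: t).length = t.length + 1 from rfl,
              scanGo_some hm, ih f (by omega) rest (le_trans hr h'),
              ih t.length (by omega) rest hr]

theorem scan_skip : ∀ (pre : List Char), (∀ q ∈ monthsB, blockedAt q.1 pre) →
    ∀ (fuel : Nat) (w : List Char), pre.length + w.length ≤ fuel →
      scanGo fuel (pre ++ w) = pre ++ scanGo w.length w := by
  intro pre
  induction pre with
  | nil =>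
    intro _ fuel w h
    exact scanGo_fuel fuel w (by simpa using h)
  | cons c pr ih =>
    intro hb fuel w h
    match fuel with
    | 0 => simp at h
    | f + 1 =>
      have hnone : matchMonth ((c :: pr) ++ w) monthsB = none := by
        apply matchMonth_none_of
        intro q hq
        have := blocked_not_prefix (hb q hq) (p := 0) (by simp) w
        simpa using this
      rw [List.cons_append, scanGo_none (by rw [← List.cons_append]; exact hnone),
          ih (fun q hq => blockedAt_tail (hb q hq)) f w (by simp at h; omega)]
      rfl

def countM (l : List Char) : Nat := l.count 'm'
theorem split_go_sum : ∀ (s cur : List Char) (accl : List (List Char)),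
    ((PySem.Chars.split₀.go s cur accl).map countM).sum
      = countM s + countM cur.reverse + (accl.map countM).sum := by
  intro s
  induction s with
  | nil =>
    intro cur accl
    by_cases hc : cur.isEmpty
    · simp [PySem.Chars.split₀.go, countM, List.isEmpty_iff.mp hc]
    · simp [PySem.Chars.split₀.go, hc, countM]
      omega
  | cons c rest ih =>
    intro cur accl
    by_cases hsp : PySem.Chars.isspace c
    · have hcm : c ≠ 'm' := by
        intro h; subst h; exact absurd hsp (by decide)
      by_cases hc : cur.isEmpty
      · rw [show PySem.Chars.split₀.go (c :: rest) cur accl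
            = PySem.Chars.split₀.go rest [] accl by simp [PySem.Chars.split₀.go, hsp, hc]]
        rw [ih]
        simp [countM, List.isEmpty_iff.mp hc, List.count_cons]
        intro h; exact absurd h hcm
      · rw [show PySem.Chars.split₀.go (c :: rest) cur accl
            = PySem.Chars.split₀.go rest [] (cur.reverse :: accl) by
          simp [PySem.Chars.split₀.go, hsp, hc]]
        rw [ih]
        simp [countM, List.count_cons]
        split
        · next h => exact absurd h hcm
        · omega
    · rw [show PySem.Chars.split₀.go (c :: rest) cur accl
          = PySem.Chars.split₀.go rest (c :: cur) accl by simp [PySem.Chars.split₀.go, hsp]]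
      rw [ih]
      simp [countM, List.count_cons]
      omega

theorem countM_append (a b : List Char) : countM (a ++ b) = countM a + countM b := by
  simp [countM]

theorem split₀_sum (l : List Char) :
    ((PySem.Chars.split₀ l).map countM).sum = countM l := by
  have := split_go_sum l [] []
  simpa [PySem.Chars.split₀, countM] using this

theorem join_sum : ∀ (parts : List (List Char)),
    countM (PySem.Chars.join " ".toList parts) = (parts.map countM).sum := by
  intro parts
  induction parts with
  | nil => rfl
  | cons a parts ih =>
    cases parts with
    | nil => simp [PySem.Chars.join, countM, List.intercalate]
    | cons b rest =>
      rw [PySem.Chars.join_cons_cons, countM_append, countM_append, ih]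
      simp [countM]

theorem countM_joinsplit (l : List Char) :
    countM (PySem.Chars.join " ".toList (PySem.Chars.split₀ l)) = countM l :=
  (join_sum _).trans (split₀_sum l)

theorem key_div (pre mid : List (List Char × List Char)) (full ab : List Char) (a b : Char)
    (hab : ab = [a, b, 'n']) (ha : a ≠ 'n') (hb : b ≠ 'n')
    (hsplit : monthsB = pre ++ (full, ab) :: mid ++
      ("november".toList, "nov".toList) :: [("december".toList, "dec".toList)])
    (hfull : full ≠ [])
    (hpre : ∀ p ∈ pre, blockedAt p.1 full)
    (hpreov : ∀ p ∈ pre, blockedAt p.1 "ovember".toList)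
    (hfullov : blockedAt full "ovember".toList)
    (hmid : ∀ p ∈ mid, blockedAt p.1 (ab ++ "ovember".toList))
    (hdec : blockedAt "december".toList (ab ++ ['o', 'v']))
    (w : List Char) :
    replFold monthsB (full ++ ("ovember".toList ++ w))
      = (ab ++ ['o', 'v']) ++ replFold monthsB w := by
  have hM : ∀ x, replFold monthsB x
      = PySem.Chars.replace
          (PySem.Chars.replace (replFold mid (PySem.Chars.replace (replFold pre x) full ab))
            "november".toList "nov".toList)
          "december".toList "dec".toList := by
    intro x; rw [hsplit]; simp [replFold, List.foldl_append]
  rw [hM, hM, fold_pre full pre hpre _, fold_pre "ovember".toList pre hpreov _,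
      repl_head full ab _ hfull (List.prefix_append full _), List.drop_left,
      repl_pre_blocked full ab "ovember".toList hfullov _,
      ← List.append_assoc ab "ovember".toList _,
      fold_pre (ab ++ "ovember".toList) mid hmid _]
  subst hab
  have hshape : ∀ (z : List Char),
      ([a, b, 'n'] ++ "ovember".toList) ++ z = a :: b :: ("november".toList ++ z) := by
    intro z; rfl
  rw [hshape]
  have h1 : ¬ "november".toList <+: (a :: b :: ("november".toList ++
      replFold mid (PySem.Chars.replace (replFold pre w) full [a, b, 'n']))) := by
    intro hc; rw [show "november".toList = 'n'::'o'::'v'::'e'::'m'::'b'::'e'::'r'::[] from rfl,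
      List.cons_prefix_cons] at hc
    exact ha hc.1.symm
  have h2 : ¬ "november".toList <+: (b :: ("november".toList ++
      replFold mid (PySem.Chars.replace (replFold pre w) full [a, b, 'n']))) := by
    intro hc; rw [show "november".toList = 'n'::'o'::'v'::'e'::'m'::'b'::'e'::'r'::[] from rfl,
      List.cons_prefix_cons] at hc
    exact hb hc.1.symm
  rw [repl_cons_not_prefix _ _ _ _ h1, repl_cons_not_prefix _ _ _ _ h2,
      repl_head _ _ _ (by decide) (List.prefix_append "november".toList _), List.drop_left]
  have hshape2 : ∀ (z : List Char),
      (a :: b :: ("nov".toList ++ z)) = ([a, b, 'n'] ++ ['o', 'v']) ++ z := by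
    intro z; rfl
  rw [hshape2, repl_pre_blocked "december".toList "dec".toList _ hdec _]

theorem infix_to_drop {pat s : List Char} (h : pat <:+: s) : ∃ j, pat <+: s.drop j :=
  (PySem.Chars.exists_prefix_drop_iff_isIn pat s).mpr ((PySem.Chars.isIn_iff_infix pat s).mpr h)

theorem straddle_mis (pat full u : List Char)
    (h : ∀ p, p < full.length →
      ∃ j, j < pat.length ∧ p + j < full.length ∧ pat[j]? ≠ full[p + j]?)
    (hinf : pat <:+: full ++ u) : pat <:+: u := by
  obtain ⟨p, hp⟩ := infix_to_drop hinf
  by_cases hlt : p < full.length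
  · rw [List.drop_append_of_le_length (le_of_lt hlt)] at hp
    exact absurd hp (not_prefix_of_mismatch (h p hlt) u)
  · rw [show p = full.length + (p - full.length) by omega, List.drop_length_add_append] at hp
    exact hp.isInfix.trans (List.drop_suffix _ u).isInfix

theorem straddle_self (pat full rest u : List Char) (hcat : pat = full ++ rest)
    (h : ∀ q, q < full.length - 1 →
      ∃ j, j < pat.length ∧ (q + 1) + j < full.length ∧ pat[j]? ≠ full[(q + 1) + j]?)
    (hov : ¬ rest <+: u) (hinf : pat <:+: full ++ u) : pat <:+: u := by
  obtain ⟨p, hp⟩ := infix_to_drop hinf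
  by_cases hlt : p < full.length
  · rcases Nat.eq_zero_or_pos p with rfl | hpos
    · rw [List.drop_zero, hcat] at hp
      exact absurd ((List.prefix_append_right_inj full).mp hp) hov
    · rw [List.drop_append_of_le_length (le_of_lt hlt)] at hp
      have hq := h (p - 1) (by omega)
      rw [show p - 1 + 1 = p by omega] at hq
      exact absurd hp (not_prefix_of_mismatch hq u)
  · rw [show p = full.length + (p - full.length) by omega, List.drop_length_add_append] at hp
    exact hp.isInfix.trans (List.drop_suffix _ u).isInfix

theorem head_le {c : Char} {X Y : List Char} (h : countM X ≤ countM Y) :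
    countM (c :: X) ≤ countM (c :: Y) := by
  simp only [countM, List.count_cons] at h ⊢; omega

theorem head_lt {c : Char} {X Y : List Char} (h : countM X < countM Y) :
    countM (c :: X) < countM (c :: Y) := by
  simp only [countM, List.count_cons] at h ⊢; omega

theorem le_branch (fuel : Nat) (c : Char) (t u full ab : List Char)
    (hu : full ++ u = c :: t)
    (hkey : replFold monthsB (full ++ u) = ab ++ replFold monthsB u)
    (ihu : countM (replFold monthsB u) ≤ countM (scanGo fuel u)) :
    countM (replFold monthsB (c :: t)) ≤ countM (ab ++ scanGo fuel ((c :: t).drop full.length)) := by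
  rw [← hu, List.drop_left, hkey, countM_append, countM_append]
  omega

theorem lt_branch (fuel : Nat) (c : Char) (t u full ab : List Char)
    (hu : full ++ u = c :: t)
    (hkey : replFold monthsB (full ++ u) = ab ++ replFold monthsB u)
    (ihu : countM (replFold monthsB u) < countM (scanGo fuel u)) :
    countM (replFold monthsB (c :: t)) < countM (ab ++ scanGo fuel ((c :: t).drop full.length)) := by
  rw [← hu, List.drop_left, hkey, countM_append, countM_append]
  omega

theorem div_branch (fuel : Nat) (c : Char) (t u w full ab : List Char)
    (hu : full ++ u = c :: t) (hw : "ovember".toList ++ w = u)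
    (hkey : replFold monthsB (full ++ ("ovember".toList ++ w))
      = (ab ++ ['o', 'v']) ++ replFold monthsB w)
    (hlen : u.length ≤ fuel)
    (ihw : countM (replFold monthsB w) ≤ countM (scanGo w.length w)) :
    countM (replFold monthsB (c :: t)) < countM (ab ++ scanGo fuel ((c :: t).drop full.length)) := by
  have hskip : scanGo fuel ("ovember".toList ++ w) = "ovember".toList ++ scanGo w.length w := by
    refine scan_skip "ovember".toList (by unfold blockedAt; decide) fuel w ?_
    have := congrArg List.length hw
    have hol : ("ovember".toList).length = 7 := by decide
    simp at this
    omega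
  rw [← hu, List.drop_left, ← hw, hkey, hskip]
  simp only [countM_append]
  have hov1 : countM "ovember".toList = 1 := by decide
  have hov0 : countM ['o', 'v'] = 0 := by decide
  omega

set_option maxHeartbeats 2000000 in
theorem countM_le : ∀ (fuel : Nat) (s : List Char), s.length ≤ fuel →
    countM (replFold monthsB s) ≤ countM (scanGo fuel s) := by
  intro fuel
  induction fuel with
  | zero =>
    intro s hs
    have hnil : s = [] := List.length_eq_zero_iff.mp (Nat.le_zero.mp hs)
    subst hnil
    rw [replFold_nil_input monthsB months_full_ne]
    exact Nat.le_refl _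
  | succ fuel ih =>
    intro s hs
    cases s with
    | nil =>
      rw [replFold_nil_input monthsB months_full_ne]
      exact Nat.le_refl _
    | cons c t =>
      cases hm : matchMonth (c :: t) monthsB with
      | none =>
        rw [fold_cons monthsB (fun p hp => hp) c t (matchMonth_none monthsB _ hm), scanGo_none hm]
        exact head_le (ih t (by simp only [List.length_cons] at hs; omega))
      | some r =>
        obtain ⟨ab, rest⟩ := r
        obtain ⟨p, hpmem, hpre, hab, hrest⟩ := matchMonth_some_elim monthsB hm
        subst hab
        subst hrest
        rw [scanGo_some hm]
        simp only [monthsB, List.mem_cons, List.not_mem_nil, or_false] at hpmem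
        rcases hpmem with rfl | rfl | rfl | rfl | rfl | rfl | rfl | rfl | rfl | rfl | rfl | rfl
        · obtain ⟨u, hu⟩ := hpre
          by_cases hov : "ovember".toList <+: u
          · obtain ⟨w, hw⟩ := hov
            have hwn : w.length ≤ fuel := by
              have h1 := congrArg List.length hw
              have h2 := branch_len hu (by decide) hs
              simp at h1
              omega
            exact le_of_lt (div_branch fuel c t u w _ _ hu hw
              (key_div [] [("february".toList, "feb".toList), ("march".toList, "mar".toList), ("april".toList, "apr".toList), ("may".toList, "may".toList), ("june".toList, "jun".toList), ("july".toList, "jul".toList), ("august".toList, "aug".toList), ("september".toList, "sep".toList), ("october".toList, "oct".toList)] "january".toList "jan".toList 'j' 'a'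
                (by decide) (by decide) (by decide) (by decide) (by decide)
                (by unfold blockedAt; decide) (by unfold blockedAt; decide) (by unfold blockedAt; decide) (by unfold blockedAt; decide) (by unfold blockedAt; decide) w)
              (branch_len hu (by decide) hs)
              (scanGo_fuel fuel w hwn ▸ ih w hwn))
          · exact le_branch fuel c t u _ _ hu
              (key_special [] [("february".toList, "feb".toList), ("march".toList, "mar".toList), ("april".toList, "apr".toList), ("may".toList, "may".toList), ("june".toList, "jun".toList), ("july".toList, "jul".toList), ("august".toList, "aug".toList), ("september".toList, "sep".toList), ("october".toList, "oct".toList)] "january".toList "jan".toList 'j' 'a'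
                (by decide) (by decide) (by decide) (by decide) (by decide)
                (by unfold blockedAt; decide) (by unfold blockedAt; decide) (by unfold blockedAt; decide)
                (by decide) u hov)
              (ih u (branch_len hu (by decide) hs))
        · obtain ⟨u, hu⟩ := hpre
          exact le_branch fuel c t u _ _ hu
            (key_regular [("january".toList, "jan".toList)] [("march".toList, "mar".toList), ("april".toList, "apr".toList), ("may".toList, "may".toList), ("june".toList, "jun".toList), ("july".toList, "jul".toList), ("august".toList, "aug".toList), ("september".toList, "sep".toList), ("october".toList, "oct".toList), ("november".toList, "nov".toList), ("december".toList, "dec".toList)] "february".toList "feb".toList (by decide) (by decide)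
              (by unfold blockedAt; decide) (by unfold blockedAt; decide) u)
            (ih u (branch_len hu (by decide) hs))
        · obtain ⟨u, hu⟩ := hpre
          exact le_branch fuel c t u _ _ hu
            (key_regular [("january".toList, "jan".toList), ("february".toList, "feb".toList)] [("april".toList, "apr".toList), ("may".toList, "may".toList), ("june".toList, "jun".toList), ("july".toList, "jul".toList), ("august".toList, "aug".toList), ("september".toList, "sep".toList), ("october".toList, "oct".toList), ("november".toList, "nov".toList), ("december".toList, "dec".toList)] "march".toList "mar".toList (by decide) (by decide)
              (by unfold blockedAt; decide) (by unfold blockedAt; decide) u)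
            (ih u (branch_len hu (by decide) hs))
        · obtain ⟨u, hu⟩ := hpre
          exact le_branch fuel c t u _ _ hu
            (key_regular [("january".toList, "jan".toList), ("february".toList, "feb".toList), ("march".toList, "mar".toList)] [("may".toList, "may".toList), ("june".toList, "jun".toList), ("july".toList, "jul".toList), ("august".toList, "aug".toList), ("september".toList, "sep".toList), ("october".toList, "oct".toList), ("november".toList, "nov".toList), ("december".toList, "dec".toList)] "april".toList "apr".toList (by decide) (by decide)
              (by unfold blockedAt; decide) (by unfold blockedAt; decide) u)
            (ih u (branch_len hu (by decide) hs))
        · obtain ⟨u, hu⟩ := hpre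
          exact le_branch fuel c t u _ _ hu
            (key_regular [("january".toList, "jan".toList), ("february".toList, "feb".toList), ("march".toList, "mar".toList), ("april".toList, "apr".toList)] [("june".toList, "jun".toList), ("july".toList, "jul".toList), ("august".toList, "aug".toList), ("september".toList, "sep".toList), ("october".toList, "oct".toList), ("november".toList, "nov".toList), ("december".toList, "dec".toList)] "may".toList "may".toList (by decide) (by decide)
              (by unfold blockedAt; decide) (by unfold blockedAt; decide) u)
            (ih u (branch_len hu (by decide) hs))
        · obtain ⟨u, hu⟩ := hpre
          by_cases hov : "ovember".toList <+: u
          · obtain ⟨w, hw⟩ := hov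
            have hwn : w.length ≤ fuel := by
              have h1 := congrArg List.length hw
              have h2 := branch_len hu (by decide) hs
              simp at h1
              omega
            exact le_of_lt (div_branch fuel c t u w _ _ hu hw
              (key_div [("january".toList, "jan".toList), ("february".toList, "feb".toList), ("march".toList, "mar".toList), ("april".toList, "apr".toList), ("may".toList, "may".toList)] [("july".toList, "jul".toList), ("august".toList, "aug".toList), ("september".toList, "sep".toList), ("october".toList, "oct".toList)] "june".toList "jun".toList 'j' 'u'
                (by decide) (by decide) (by decide) (by decide) (by decide)
                (by unfold blockedAt; decide) (by unfold blockedAt; decide) (by unfold blockedAt; decide) (by unfold blockedAt; decide) (by unfold blockedAt; decide) w)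
              (branch_len hu (by decide) hs)
              (scanGo_fuel fuel w hwn ▸ ih w hwn))
          · exact le_branch fuel c t u _ _ hu
              (key_special [("january".toList, "jan".toList), ("february".toList, "feb".toList), ("march".toList, "mar".toList), ("april".toList, "apr".toList), ("may".toList, "may".toList)] [("july".toList, "jul".toList), ("august".toList, "aug".toList), ("september".toList, "sep".toList), ("october".toList, "oct".toList)] "june".toList "jun".toList 'j' 'u'
                (by decide) (by decide) (by decide) (by decide) (by decide)
                (by unfold blockedAt; decide) (by unfold blockedAt; decide) (by unfold blockedAt; decide)
                (by decide) u hov)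
              (ih u (branch_len hu (by decide) hs))
        · obtain ⟨u, hu⟩ := hpre
          exact le_branch fuel c t u _ _ hu
            (key_regular [("january".toList, "jan".toList), ("february".toList, "feb".toList), ("march".toList, "mar".toList), ("april".toList, "apr".toList), ("may".toList, "may".toList), ("june".toList, "jun".toList)] [("august".toList, "aug".toList), ("september".toList, "sep".toList), ("october".toList, "oct".toList), ("november".toList, "nov".toList), ("december".toList, "dec".toList)] "july".toList "jul".toList (by decide) (by decide)
              (by unfold blockedAt; decide) (by unfold blockedAt; decide) u)
            (ih u (branch_len hu (by decide) hs))
        · obtain ⟨u, hu⟩ := hpre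
          exact le_branch fuel c t u _ _ hu
            (key_regular [("january".toList, "jan".toList), ("february".toList, "feb".toList), ("march".toList, "mar".toList), ("april".toList, "apr".toList), ("may".toList, "may".toList), ("june".toList, "jun".toList), ("july".toList, "jul".toList)] [("september".toList, "sep".toList), ("october".toList, "oct".toList), ("november".toList, "nov".toList), ("december".toList, "dec".toList)] "august".toList "aug".toList (by decide) (by decide)
              (by unfold blockedAt; decide) (by unfold blockedAt; decide) u)
            (ih u (branch_len hu (by decide) hs))
        · obtain ⟨u, hu⟩ := hpre
          exact le_branch fuel c t u _ _ hu
            (key_regular [("january".toList, "jan".toList), ("february".toList, "feb".toList), ("march".toList, "mar".toList), ("april".toList, "apr".toList), ("may".toList, "may".toList), ("june".toList, "jun".toList), ("july".toList, "jul".toList), ("august".toList, "aug".toList)] [("october".toList, "oct".toList), ("november".toList, "nov".toList), ("december".toList, "dec".toList)] "september".toList "sep".toList (by decide) (by decide)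
              (by unfold blockedAt; decide) (by unfold blockedAt; decide) u)
            (ih u (branch_len hu (by decide) hs))
        · obtain ⟨u, hu⟩ := hpre
          exact le_branch fuel c t u _ _ hu
            (key_regular [("january".toList, "jan".toList), ("february".toList, "feb".toList), ("march".toList, "mar".toList), ("april".toList, "apr".toList), ("may".toList, "may".toList), ("june".toList, "jun".toList), ("july".toList, "jul".toList), ("august".toList, "aug".toList), ("september".toList, "sep".toList)] [("november".toList, "nov".toList), ("december".toList, "dec".toList)] "october".toList "oct".toList (by decide) (by decide)
              (by unfold blockedAt; decide) (by unfold blockedAt; decide) u)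
            (ih u (branch_len hu (by decide) hs))
        · obtain ⟨u, hu⟩ := hpre
          exact le_branch fuel c t u _ _ hu
            (key_regular [("january".toList, "jan".toList), ("february".toList, "feb".toList), ("march".toList, "mar".toList), ("april".toList, "apr".toList), ("may".toList, "may".toList), ("june".toList, "jun".toList), ("july".toList, "jul".toList), ("august".toList, "aug".toList), ("september".toList, "sep".toList), ("october".toList, "oct".toList)] [("december".toList, "dec".toList)] "november".toList "nov".toList (by decide) (by decide)
              (by unfold blockedAt; decide) (by unfold blockedAt; decide) u)
            (ih u (branch_len hu (by decide) hs))
        · obtain ⟨u, hu⟩ := hpre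
          exact le_branch fuel c t u _ _ hu
            (key_regular [("january".toList, "jan".toList), ("february".toList, "feb".toList), ("march".toList, "mar".toList), ("april".toList, "apr".toList), ("may".toList, "may".toList), ("june".toList, "jun".toList), ("july".toList, "jul".toList), ("august".toList, "aug".toList), ("september".toList, "sep".toList), ("october".toList, "oct".toList), ("november".toList, "nov".toList)] [] "december".toList "dec".toList (by decide) (by decide)
              (by unfold blockedAt; decide) (by unfold blockedAt; decide) u)
            (ih u (branch_len hu (by decide) hs))

set_option maxHeartbeats 2000000 in
theorem countM_lt : ∀ (fuel : Nat) (s : List Char), s.length ≤ fuel →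
    ("januaryovember".toList <:+: s ∨ "juneovember".toList <:+: s) →
    countM (replFold monthsB s) < countM (scanGo fuel s) := by
  intro fuel
  induction fuel with
  | zero =>
    intro s hs hD
    have hnil : s = [] := List.length_eq_zero_iff.mp (Nat.le_zero.mp hs)
    subst hnil
    rcases hD with hD | hD
    · exact absurd (List.eq_nil_of_infix_nil hD) (by decide)
    · exact absurd (List.eq_nil_of_infix_nil hD) (by decide)
  | succ fuel ih =>
    intro s hs hD
    cases s with
    | nil =>
      rcases hD with hD | hD
      · exact absurd (List.eq_nil_of_infix_nil hD) (by decide)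
      · exact absurd (List.eq_nil_of_infix_nil hD) (by decide)
    | cons c t =>
      cases hm : matchMonth (c :: t) monthsB with
      | none =>
        have hnp := matchMonth_none monthsB _ hm
        have hD' : ("januaryovember".toList <:+: t) ∨ ("juneovember".toList <:+: t) := by
          rcases hD with hD | hD
          · rcases List.infix_cons_iff.mp hD with hp | hi
            · exact absurd ((by decide : "january".toList <+: "januaryovember".toList).trans hp)
                (hnp ("january".toList, "jan".toList) (by decide))
            · exact Or.inl hi
          · rcases List.infix_cons_iff.mp hD with hp | hi
            · exact absurd ((by decide : "june".toList <+: "juneovember".toList).trans hp)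
                (hnp ("june".toList, "jun".toList) (by decide))
            · exact Or.inr hi
        rw [fold_cons monthsB (fun p hp => hp) c t hnp, scanGo_none hm]
        exact head_lt (ih t (by simp only [List.length_cons] at hs; omega) hD')
      | some r =>
        obtain ⟨ab, rest⟩ := r
        obtain ⟨p, hpmem, hpre, hab, hrest⟩ := matchMonth_some_elim monthsB hm
        subst hab
        subst hrest
        rw [scanGo_some hm]
        simp only [monthsB, List.mem_cons, List.not_mem_nil, or_false] at hpmem
        rcases hpmem with rfl | rfl | rfl | rfl | rfl | rfl | rfl | rfl | rfl | rfl | rfl | rfl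
        · obtain ⟨u, hu⟩ := hpre
          by_cases hov : "ovember".toList <+: u
          · obtain ⟨w, hw⟩ := hov
            have hwn : w.length ≤ fuel := by
              have h1 := congrArg List.length hw
              have h2 := branch_len hu (by decide) hs
              simp at h1
              omega
            exact div_branch fuel c t u w _ _ hu hw
              (key_div [] [("february".toList, "feb".toList), ("march".toList, "mar".toList), ("april".toList, "apr".toList), ("may".toList, "may".toList), ("june".toList, "jun".toList), ("july".toList, "jul".toList), ("august".toList, "aug".toList), ("september".toList, "sep".toList), ("october".toList, "oct".toList)] "january".toList "jan".toList 'j' 'a'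
                (by decide) (by decide) (by decide) (by decide) (by decide)
                (by unfold blockedAt; decide) (by unfold blockedAt; decide) (by unfold blockedAt; decide) (by unfold blockedAt; decide) (by unfold blockedAt; decide) w)
              (branch_len hu (by decide) hs)
              (scanGo_fuel fuel w hwn ▸ countM_le fuel w hwn)
          · have hD' : ("januaryovember".toList <:+: u) ∨ ("juneovember".toList <:+: u) := by
              rcases hD with hD | hD
              · exact Or.inl (straddle_self "januaryovember".toList "january".toList "ovember".toList u (by decide) (by decide) hov (by rw [hu]; exact hD))
              · exact Or.inr (straddle_mis "juneovember".toList "january".toList u (by decide) (by rw [hu]; exact hD))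
            exact lt_branch fuel c t u _ _ hu
              (key_special [] [("february".toList, "feb".toList), ("march".toList, "mar".toList), ("april".toList, "apr".toList), ("may".toList, "may".toList), ("june".toList, "jun".toList), ("july".toList, "jul".toList), ("august".toList, "aug".toList), ("september".toList, "sep".toList), ("october".toList, "oct".toList)] "january".toList "jan".toList 'j' 'a'
                (by decide) (by decide) (by decide) (by decide) (by decide)
                (by unfold blockedAt; decide) (by unfold blockedAt; decide) (by unfold blockedAt; decide)
                (by decide) u hov)
              (ih u (branch_len hu (by decide) hs) hD')
        · obtain ⟨u, hu⟩ := hpre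
          have hD' : ("januaryovember".toList <:+: u) ∨ ("juneovember".toList <:+: u) := by
            rcases hD with hD | hD
            · exact Or.inl (straddle_mis "januaryovember".toList "february".toList u (by decide) (by rw [hu]; exact hD))
            · exact Or.inr (straddle_mis "juneovember".toList "february".toList u (by decide) (by rw [hu]; exact hD))
          exact lt_branch fuel c t u _ _ hu
            (key_regular [("january".toList, "jan".toList)] [("march".toList, "mar".toList), ("april".toList, "apr".toList), ("may".toList, "may".toList), ("june".toList, "jun".toList), ("july".toList, "jul".toList), ("august".toList, "aug".toList), ("september".toList, "sep".toList), ("october".toList, "oct".toList), ("november".toList, "nov".toList), ("december".toList, "dec".toList)] "february".toList "feb".toList (by decide) (by decide)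
              (by unfold blockedAt; decide) (by unfold blockedAt; decide) u)
            (ih u (branch_len hu (by decide) hs) hD')
        · obtain ⟨u, hu⟩ := hpre
          have hD' : ("januaryovember".toList <:+: u) ∨ ("juneovember".toList <:+: u) := by
            rcases hD with hD | hD
            · exact Or.inl (straddle_mis "januaryovember".toList "march".toList u (by decide) (by rw [hu]; exact hD))
            · exact Or.inr (straddle_mis "juneovember".toList "march".toList u (by decide) (by rw [hu]; exact hD))
          exact lt_branch fuel c t u _ _ hu
            (key_regular [("january".toList, "jan".toList), ("february".toList, "feb".toList)] [("april".toList, "apr".toList), ("may".toList, "may".toList), ("june".toList, "jun".toList), ("july".toList, "jul".toList), ("august".toList, "aug".toList), ("september".toList, "sep".toList), ("october".toList, "oct".toList), ("november".toList, "nov".toList), ("december".toList, "dec".toList)] "march".toList "mar".toList (by decide) (by decide)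
              (by unfold blockedAt; decide) (by unfold blockedAt; decide) u)
            (ih u (branch_len hu (by decide) hs) hD')
        · obtain ⟨u, hu⟩ := hpre
          have hD' : ("januaryovember".toList <:+: u) ∨ ("juneovember".toList <:+: u) := by
            rcases hD with hD | hD
            · exact Or.inl (straddle_mis "januaryovember".toList "april".toList u (by decide) (by rw [hu]; exact hD))
            · exact Or.inr (straddle_mis "juneovember".toList "april".toList u (by decide) (by rw [hu]; exact hD))
          exact lt_branch fuel c t u _ _ hu
            (key_regular [("january".toList, "jan".toList), ("february".toList, "feb".toList), ("march".toList, "mar".toList)] [("may".toList, "may".toList), ("june".toList, "jun".toList), ("july".toList, "jul".toList), ("august".toList, "aug".toList), ("september".toList, "sep".toList), ("october".toList, "oct".toList), ("november".toList, "nov".toList), ("december".toList, "dec".toList)] "april".toList "apr".toList (by decide) (by decide)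
              (by unfold blockedAt; decide) (by unfold blockedAt; decide) u)
            (ih u (branch_len hu (by decide) hs) hD')
        · obtain ⟨u, hu⟩ := hpre
          have hD' : ("januaryovember".toList <:+: u) ∨ ("juneovember".toList <:+: u) := by
            rcases hD with hD | hD
            · exact Or.inl (straddle_mis "januaryovember".toList "may".toList u (by decide) (by rw [hu]; exact hD))
            · exact Or.inr (straddle_mis "juneovember".toList "may".toList u (by decide) (by rw [hu]; exact hD))
          exact lt_branch fuel c t u _ _ hu
            (key_regular [("january".toList, "jan".toList), ("february".toList, "feb".toList), ("march".toList, "mar".toList), ("april".toList, "apr".toList)] [("june".toList, "jun".toList), ("july".toList, "jul".toList), ("august".toList, "aug".toList), ("september".toList, "sep".toList), ("october".toList, "oct".toList), ("november".toList, "nov".toList), ("december".toList, "dec".toList)] "may".toList "may".toList (by decide) (by decide)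
              (by unfold blockedAt; decide) (by unfold blockedAt; decide) u)
            (ih u (branch_len hu (by decide) hs) hD')
        · obtain ⟨u, hu⟩ := hpre
          by_cases hov : "ovember".toList <+: u
          · obtain ⟨w, hw⟩ := hov
            have hwn : w.length ≤ fuel := by
              have h1 := congrArg List.length hw
              have h2 := branch_len hu (by decide) hs
              simp at h1
              omega
            exact div_branch fuel c t u w _ _ hu hw
              (key_div [("january".toList, "jan".toList), ("february".toList, "feb".toList), ("march".toList, "mar".toList), ("april".toList, "apr".toList), ("may".toList, "may".toList)] [("july".toList, "jul".toList), ("august".toList, "aug".toList), ("september".toList, "sep".toList), ("october".toList, "oct".toList)] "june".toList "jun".toList 'j' 'u'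
                (by decide) (by decide) (by decide) (by decide) (by decide)
                (by unfold blockedAt; decide) (by unfold blockedAt; decide) (by unfold blockedAt; decide) (by unfold blockedAt; decide) (by unfold blockedAt; decide) w)
              (branch_len hu (by decide) hs)
              (scanGo_fuel fuel w hwn ▸ countM_le fuel w hwn)
          · have hD' : ("januaryovember".toList <:+: u) ∨ ("juneovember".toList <:+: u) := by
              rcases hD with hD | hD
              · exact Or.inl (straddle_mis "januaryovember".toList "june".toList u (by decide) (by rw [hu]; exact hD))
              · exact Or.inr (straddle_self "juneovember".toList "june".toList "ovember".toList u (by decide) (by decide) hov (by rw [hu]; exact hD))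
            exact lt_branch fuel c t u _ _ hu
              (key_special [("january".toList, "jan".toList), ("february".toList, "feb".toList), ("march".toList, "mar".toList), ("april".toList, "apr".toList), ("may".toList, "may".toList)] [("july".toList, "jul".toList), ("august".toList, "aug".toList), ("september".toList, "sep".toList), ("october".toList, "oct".toList)] "june".toList "jun".toList 'j' 'u'
                (by decide) (by decide) (by decide) (by decide) (by decide)
                (by unfold blockedAt; decide) (by unfold blockedAt; decide) (by unfold blockedAt; decide)
                (by decide) u hov)
              (ih u (branch_len hu (by decide) hs) hD')
        · obtain ⟨u, hu⟩ := hpre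
          have hD' : ("januaryovember".toList <:+: u) ∨ ("juneovember".toList <:+: u) := by
            rcases hD with hD | hD
            · exact Or.inl (straddle_mis "januaryovember".toList "july".toList u (by decide) (by rw [hu]; exact hD))
            · exact Or.inr (straddle_mis "juneovember".toList "july".toList u (by decide) (by rw [hu]; exact hD))
          exact lt_branch fuel c t u _ _ hu
            (key_regular [("january".toList, "jan".toList), ("february".toList, "feb".toList), ("march".toList, "mar".toList), ("april".toList, "apr".toList), ("may".toList, "may".toList), ("june".toList, "jun".toList)] [("august".toList, "aug".toList), ("september".toList, "sep".toList), ("october".toList, "oct".toList), ("november".toList, "nov".toList), ("december".toList, "dec".toList)] "july".toList "jul".toList (by decide) (by decide)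
              (by unfold blockedAt; decide) (by unfold blockedAt; decide) u)
            (ih u (branch_len hu (by decide) hs) hD')
        · obtain ⟨u, hu⟩ := hpre
          have hD' : ("januaryovember".toList <:+: u) ∨ ("juneovember".toList <:+: u) := by
            rcases hD with hD | hD
            · exact Or.inl (straddle_mis "januaryovember".toList "august".toList u (by decide) (by rw [hu]; exact hD))
            · exact Or.inr (straddle_mis "juneovember".toList "august".toList u (by decide) (by rw [hu]; exact hD))
          exact lt_branch fuel c t u _ _ hu
            (key_regular [("january".toList, "jan".toList), ("february".toList, "feb".toList), ("march".toList, "mar".toList), ("april".toList, "apr".toList), ("may".toList, "may".toList), ("june".toList, "jun".toList), ("july".toList, "jul".toList)] [("september".toList, "sep".toList), ("october".toList, "oct".toList), ("november".toList, "nov".toList), ("december".toList, "dec".toList)] "august".toList "aug".toList (by decide) (by decide)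
              (by unfold blockedAt; decide) (by unfold blockedAt; decide) u)
            (ih u (branch_len hu (by decide) hs) hD')
        · obtain ⟨u, hu⟩ := hpre
          have hD' : ("januaryovember".toList <:+: u) ∨ ("juneovember".toList <:+: u) := by
            rcases hD with hD | hD
            · exact Or.inl (straddle_mis "januaryovember".toList "september".toList u (by decide) (by rw [hu]; exact hD))
            · exact Or.inr (straddle_mis "juneovember".toList "september".toList u (by decide) (by rw [hu]; exact hD))
          exact lt_branch fuel c t u _ _ hu
            (key_regular [("january".toList, "jan".toList), ("february".toList, "feb".toList), ("march".toList, "mar".toList), ("april".toList, "apr".toList), ("may".toList, "may".toList), ("june".toList, "jun".toList), ("july".toList, "jul".toList), ("august".toList, "aug".toList)] [("october".toList, "oct".toList), ("november".toList, "nov".toList), ("december".toList, "dec".toList)] "september".toList "sep".toList (by decide) (by decide)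
              (by unfold blockedAt; decide) (by unfold blockedAt; decide) u)
            (ih u (branch_len hu (by decide) hs) hD')
        · obtain ⟨u, hu⟩ := hpre
          have hD' : ("januaryovember".toList <:+: u) ∨ ("juneovember".toList <:+: u) := by
            rcases hD with hD | hD
            · exact Or.inl (straddle_mis "januaryovember".toList "october".toList u (by decide) (by rw [hu]; exact hD))
            · exact Or.inr (straddle_mis "juneovember".toList "october".toList u (by decide) (by rw [hu]; exact hD))
          exact lt_branch fuel c t u _ _ hu
            (key_regular [("january".toList, "jan".toList), ("february".toList, "feb".toList), ("march".toList, "mar".toList), ("april".toList, "apr".toList), ("may".toList, "may".toList), ("june".toList, "jun".toList), ("july".toList, "jul".toList), ("august".toList, "aug".toList), ("september".toList, "sep".toList)] [("november".toList, "nov".toList), ("december".toList, "dec".toList)] "october".toList "oct".toList (by decide) (by decide)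
              (by unfold blockedAt; decide) (by unfold blockedAt; decide) u)
            (ih u (branch_len hu (by decide) hs) hD')
        · obtain ⟨u, hu⟩ := hpre
          have hD' : ("januaryovember".toList <:+: u) ∨ ("juneovember".toList <:+: u) := by
            rcases hD with hD | hD
            · exact Or.inl (straddle_mis "januaryovember".toList "november".toList u (by decide) (by rw [hu]; exact hD))
            · exact Or.inr (straddle_mis "juneovember".toList "november".toList u (by decide) (by rw [hu]; exact hD))
          exact lt_branch fuel c t u _ _ hu
            (key_regular [("january".toList, "jan".toList), ("february".toList, "feb".toList), ("march".toList, "mar".toList), ("april".toList, "apr".toList), ("may".toList, "may".toList), ("june".toList, "jun".toList), ("july".toList, "jul".toList), ("august".toList, "aug".toList), ("september".toList, "sep".toList), ("october".toList, "oct".toList)] [("december".toList, "dec".toList)] "november".toList "nov".toList (by decide) (by decide)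
              (by unfold blockedAt; decide) (by unfold blockedAt; decide) u)
            (ih u (branch_len hu (by decide) hs) hD')
        · obtain ⟨u, hu⟩ := hpre
          have hD' : ("januaryovember".toList <:+: u) ∨ ("juneovember".toList <:+: u) := by
            rcases hD with hD | hD
            · exact Or.inl (straddle_mis "januaryovember".toList "december".toList u (by decide) (by rw [hu]; exact hD))
            · exact Or.inr (straddle_mis "juneovember".toList "december".toList u (by decide) (by rw [hu]; exact hD))
          exact lt_branch fuel c t u _ _ hu
            (key_regular [("january".toList, "jan".toList), ("february".toList, "feb".toList), ("march".toList, "mar".toList), ("april".toList, "apr".toList), ("may".toList, "may".toList), ("june".toList, "jun".toList), ("july".toList, "jul".toList), ("august".toList, "aug".toList), ("september".toList, "sep".toList), ("october".toList, "oct".toList), ("november".toList, "nov".toList)] [] "december".toList "dec".toList (by decide) (by decide)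
              (by unfold blockedAt; decide) (by unfold blockedAt; decide) u)
            (ih u (branch_len hu (by decide) hs) hD')

theorem isspace_of_range {c : Char} (h1 : 65 ≤ c.toNat) (h2 : c.toNat ≤ 122) :
    PySem.Chars.isspace c = false := by
  unfold PySem.Chars.isspace
  simp only [Bool.or_eq_false_iff, Bool.and_eq_false_iff, decide_eq_false_iff_not]
  omega
theorem isspace_lowerChar (c : Char) :
    PySem.Chars.isspace (PySem.Chars.lowerChar c) = PySem.Chars.isspace c := by
  unfold PySem.Chars.lowerChar
  by_cases h : PySem.Chars.isupper c = true
  · have h' : ('A' ≤ c ∧ c ≤ 'Z') := by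
      unfold PySem.Chars.isupper at h
      simpa using h
    have hA' : 65 ≤ c.toNat := by exact_mod_cast h'.1
    have hZ' : c.toNat ≤ 90 := by exact_mod_cast h'.2
    have ht : (Char.ofNat (c.toNat + 32)).toNat = c.toNat + 32 := charOfNat_toNat _ (by omega)
    rw [if_pos h]
    rw [isspace_of_range (by omega) (by omega), isspace_of_range hA' (by omega)]
  · simp [h]

theorem strip_map_lower (l : List Char) :
    PySem.Chars.strip (l.map PySem.Chars.lowerChar)
      = (PySem.Chars.strip l).map PySem.Chars.lowerChar := by
  have hfun : (PySem.Chars.isspace ∘ PySem.Chars.lowerChar) = PySem.Chars.isspace :=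
    funext isspace_lowerChar
  unfold PySem.Chars.strip PySem.Chars.rstrip PySem.Chars.lstrip
  rw [List.dropWhile_map, hfun, ← List.map_reverse, List.dropWhile_map, hfun, ← List.map_reverse]

theorem infix_lstrip (pat : List Char) (p : Char) (prest : List Char)
    (hpat : pat = p :: prest) (hp : PySem.Chars.isspace p = false) :
    ∀ (l : List Char), pat <:+: l → pat <:+: List.dropWhile PySem.Chars.isspace l := by
  intro l
  induction l with
  | nil =>
    intro h
    simpa using h
  | cons c t ih =>
    intro h
    by_cases hc : PySem.Chars.isspace c
    · rw [List.dropWhile_cons_of_pos hc]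
      rcases List.infix_cons_iff.mp h with hpre | hinf
      · rw [hpat, List.cons_prefix_cons] at hpre
        rw [← hpre.1] at hc
        exact absurd hc (by simp [hp])
      · exact ih hinf
    · rwa [List.dropWhile_cons_of_neg hc]

theorem infix_strip (pat : List Char) (p q : Char) (prest qrest : List Char)
    (hpat : pat = p :: prest) (hp : PySem.Chars.isspace p = false)
    (hqat : pat.reverse = q :: qrest) (hq : PySem.Chars.isspace q = false)
    (l : List Char) (h : pat <:+: l) : pat <:+: PySem.Chars.strip l := by
  unfold PySem.Chars.strip PySem.Chars.rstrip PySem.Chars.lstrip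
  have h1 : pat <:+: List.dropWhile PySem.Chars.isspace l := infix_lstrip pat p prest hpat hp l h
  rw [← List.reverse_infix]
  rw [List.reverse_reverse]
  exact infix_lstrip pat.reverse q qrest hqat hq _ (List.reverse_infix.mpr h1)

theorem reprA (svc : String) (hsv : ¬ svc = "") :
    (normalize_service_period svc).toList
      = PySem.Chars.join " ".toList (PySem.Chars.split₀
          (replFold monthsB ((PySem.Str.lower (cleanA svc)).toList))) := by
  have hmap : month_mappings.map (fun p => (p.1.toList, p.2.toList)) = monthsB := by decide
  rw [show (normalize_service_period svc)
      = PySem.Str.join " " (PySem.Str.split₀ (month_mappings.foldl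
          (fun acc p => PySem.Str.replace acc p.1 p.2) (PySem.Str.lower (cleanA svc)))) by
    simp [normalize_service_period, hsv]]
  rw [show ∀ (x : String), (PySem.Str.join " " (PySem.Str.split₀ x)).toList
      = PySem.Chars.join " ".toList (PySem.Chars.split₀ x.toList) by
    intro x
    simp [PySem.Str.join, PySem.Str.split₀, String.toList_ofList, List.map_map,
      Function.comp_def]]
  rw [strFold, hmap]

theorem reprB (svc : String) (hsv : ¬ svc = "") :
    (normalize_service_period_alt svc).toList
      = PySem.Chars.join " ".toList (PySem.Chars.split₀
          (scanGo (cleanA svc).toList.length (cleanA svc).toList)) := by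
  rw [show (normalize_service_period_alt svc)
      = PySem.Str.join " " (PySem.Str.split₀ (String.ofList
          (scanGo (cleanA svc).toList.length (cleanA svc).toList))) by
    simp [normalize_service_period_alt, hsv]]
  rw [show ∀ (x : String), (PySem.Str.join " " (PySem.Str.split₀ x)).toList
      = PySem.Chars.join " ".toList (PySem.Chars.split₀ x.toList) by
    intro x
    simp [PySem.Str.join, PySem.Str.split₀, String.toList_ofList, List.map_map,
      Function.comp_def]]
  rw [show (String.ofList (scanGo (cleanA svc).toList.length (cleanA svc).toList)).toList
      = scanGo (cleanA svc).toList.length (cleanA svc).toList from String.toList_ofList]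

theorem D_to_clean (svc : String) (hDom : Dom_normalize_service_period svc) (hsv : ¬ svc = "")
    (pat : String) (p q : Char) (prest qrest : List Char)
    (hpat : pat.toList = p :: prest) (hp : PySem.Chars.isspace p = false)
    (hqat : pat.toList.reverse = q :: qrest) (hq : PySem.Chars.isspace q = false)
    (hIn : PySem.Str.isIn pat (PySem.Str.lower svc) = true) :
    pat.toList <:+: (cleanA svc).toList := by
  have hinf : pat.toList <:+: svc.toList.map PySem.Chars.lowerChar := by
    have := (PySem.Str.isIn_iff_infix pat (PySem.Str.lower svc)).mp hIn
    simpa [PySem.Str.lower, String.toList_ofList, PySem.Chars.lower] using this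
  have hL : (cleanA svc).toList
      = PySem.Chars.strip (svc.toList.map PySem.Chars.lowerChar) := by
    simp [cleanA, hsv, PySem.Str.lower, PySem.Str.strip, String.toList_ofList,
      PySem.Chars.lower, bel_id svc hDom, strip_map_lower]
  rw [hL]
  exact infix_strip pat.toList p q prest qrest hpat hp hqat hq _ hinf

theorem tight_ne (svc : String) (hDom : Dom_normalize_service_period svc)
    (hD : D_normalize_service_period svc) :
    normalize_service_period svc ≠ normalize_service_period_alt svc := by
  intro heq
  have hsv : ¬ svc = "" := by
    rintro rfl
    exact (by decide : ¬ D_normalize_service_period "") hD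
  have hinfL : ("januaryovember".toList <:+: (cleanA svc).toList) ∨
      ("juneovember".toList <:+: (cleanA svc).toList) := by
    rcases hD with h | h
    · exact Or.inl (D_to_clean svc hDom hsv "januaryovember" 'j' 'r'
        "anuaryovember".toList "ebmevoyraunaj".toList
        (by decide) (by decide) (by decide) (by decide) h)
    · exact Or.inr (D_to_clean svc hDom hsv "juneovember" 'j' 'r'
        "uneovember".toList "ebmevoenuj".toList
        (by decide) (by decide) (by decide) (by decide) h)
  have hlt := countM_lt (cleanA svc).toList.length (cleanA svc).toList le_rfl hinfL
  have hcntA : countM (normalize_service_period svc).toList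
      = countM (replFold monthsB (cleanA svc).toList) := by
    rw [reprA svc hsv, countM_joinsplit, lower_cleanA svc hsv]
  have hcntB : countM (normalize_service_period_alt svc).toList
      = countM (scanGo (cleanA svc).toList.length (cleanA svc).toList) := by
    rw [reprB svc hsv, countM_joinsplit]
  have hceq : countM (normalize_service_period svc).toList
      = countM (normalize_service_period_alt svc).toList := by rw [heq]
  omega

-- ===== VERDICT (by name: the statement is the Claim_ definition above) =====
theorem normalize_service_period_spec : Claim_unchanged_normalize_service_period := by
  intro svc hDom hND
  exact main_eq svc hDom hND

set_option maxRecDepth 40000 in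
theorem normalize_service_period_changed : Claim_changed_normalize_service_period := by
  unfold Claim_changed_normalize_service_period; decide

theorem normalize_service_period_tight : Claim_exact_normalize_service_period := by
  intro svc hDom hD
  exact tight_ne svc hDom hD
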